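-- pv_equiv track=rewrite | github.com/hungphucht001/PPUM_ILP_v2 | data.py | convertItemToChar
-- ===== SOURCE A (Python) =====
-- def convertItemToChar(dataset):
--     Tmp_item=[]
--     Tmp_value=[]
--     for i in range(len(dataset)):
--         tmp_item=[]
--         tmp_value=[]
--         for j in range(len(dataset[i])):
--             s=dataset[i][j].split(':')
--             tmp_item.append(s[0])
--             tmp_value.append(s[1])
--         Tmp_item.append(tmp_item)
--         Tmp_value.append(tmp_value)
--     return Tmp_item,Tmp_value
-- ===== SOURCE B (Python) =====
-- def convertItemToChar(dataset):
--     items_rows = []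
--     values_rows = []
--     for row in dataset:
--         pairs = [s.split(':') for s in row]
--         if pairs:
--             cols = list(zip(*pairs))
--             items_rows.append(list(cols[0]))
--             values_rows.append(list(cols[1]))
--         else:
--             items_rows.append([])
--             values_rows.append([])
--     return items_rows, values_rows
-- ===== Notes on version B (the rewrite author's own statement) =====
-- stated objective: alternative
-- what changed: B builds the per-row table of split pairs once and transposes it with zip(*pairs) to peel off the item and value columns, instead of A's index-driven double loop with two parallel element-by-element appends.
import Mathlib
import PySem

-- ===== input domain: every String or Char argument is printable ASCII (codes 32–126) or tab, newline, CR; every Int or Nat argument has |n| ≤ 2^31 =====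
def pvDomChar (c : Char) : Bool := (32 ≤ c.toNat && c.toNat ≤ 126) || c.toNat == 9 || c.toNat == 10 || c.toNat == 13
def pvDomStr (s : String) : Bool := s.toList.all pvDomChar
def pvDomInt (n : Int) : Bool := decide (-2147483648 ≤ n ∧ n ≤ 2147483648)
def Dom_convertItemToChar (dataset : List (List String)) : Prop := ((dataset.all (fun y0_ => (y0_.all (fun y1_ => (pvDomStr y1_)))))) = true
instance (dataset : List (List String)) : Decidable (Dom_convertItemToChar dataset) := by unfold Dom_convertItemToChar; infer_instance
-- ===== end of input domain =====

-- B restructures the computation: per row it builds the table of split pairs once and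
-- transposes it (zip(*pairs)) into the item and value columns, instead of A's
-- index-driven double loop with two parallel element-by-element appends. Same cost.

-- ===== PORT A =====
-- s.split(':')[0] and [1]; under Pre_ both indices are in range (the .getD "" default is never hit there)
def pvTok0 (s : String) : String := ((PySem.List.pyGet? ((PySem.Str.split? s ":").getD []) 0).getD "")
def pvTok1 (s : String) : String := ((PySem.List.pyGet? ((PySem.Str.split? s ":").getD []) 1).getD "")

def convertItemToChar (dataset : List (List String)) : List (List String) × List (List String) :=
  -- outer loop over rows, carrying (Tmp_item, Tmp_value); inner loop carries (tmp_item, tmp_value)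
  dataset.foldl
    (fun (Acc : List (List String) × List (List String)) row =>
      let inner := row.foldl
        (fun (acc : List String × List String) s =>
          (acc.1 ++ [pvTok0 s], acc.2 ++ [pvTok1 s])) ([], [])
      (Acc.1 ++ [inner.1], Acc.2 ++ [inner.2]))
    ([], [])

-- ===== PORT B =====
-- per row: pairs = [s.split(':') for s in row]; if nonempty, zip(*pairs) and take columns 0 and 1.
-- Column k of zip(*pairs) is pairs.map (index k), exact here since under Pre_ every pair has length ≥ 2
-- (and the guard keeps the empty row out of the transpose, as in Source B).
def pvRowCols (row : List String) : List String × List String :=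
  let pairs := row.map (fun s => (PySem.Str.split? s ":").getD [])
  if pairs.isEmpty then ([], [])
  else (pairs.map (fun p => (PySem.List.pyGet? p 0).getD ""),
        pairs.map (fun p => (PySem.List.pyGet? p 1).getD ""))

def convertItemToChar_alt (dataset : List (List String)) : List (List String) × List (List String) :=
  let per := dataset.map pvRowCols
  (per.map Prod.fst, per.map Prod.snd)

-- ===== PRECONDITION & SPEC =====
-- Pre_ excludes exactly the inputs where Python A raises IndexError: a token without ':' makes s.split(':')[1] fail.
def Pre_convertItemToChar (dataset : List (List String)) : Prop :=
  (dataset.all (fun row => row.all (fun s => PySem.Str.isIn ":" s))) = true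
instance (dataset : List (List String)) : Decidable (Pre_convertItemToChar dataset) := by
  unfold Pre_convertItemToChar; infer_instance

def pvWitness_convertItemToChar : List (List String) := [["a:1", "b:2"], [], ["c:3"]]

def Spec_convertItemToChar (dataset : List (List String)) (out : List (List String) × List (List String)) : Prop := out = convertItemToChar_alt dataset
instance (dataset : List (List String)) (out : List (List String) × List (List String)) : Decidable (Spec_convertItemToChar dataset out) := by unfold Spec_convertItemToChar; infer_instance

-- ===== CLAIM (what is proved, stated in full; the proofs are below) =====
def Claim_equal_convertItemToChar : Prop := ∀ (dataset : List (List String)), Dom_convertItemToChar dataset → Pre_convertItemToChar dataset → Spec_convertItemToChar dataset (convertItemToChar dataset)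

-- ===== LEMMAS AND PROOFS =====

-- A's inner loop appends pvTok0/pvTok1 of each token to the accumulator pair
theorem pvInner_eq (row : List String) (acc : List String × List String) :
    row.foldl (fun (acc : List String × List String) s => (acc.1 ++ [pvTok0 s], acc.2 ++ [pvTok1 s])) acc
      = (acc.1 ++ row.map pvTok0, acc.2 ++ row.map pvTok1) := by
  induction row generalizing acc with
  | nil => simp
  | cons s rest ih => simp [List.foldl, ih]

-- B's per-row transpose produces exactly those two columns (incl. the empty-row guard)
theorem pvRowCols_eq (row : List String) :
    pvRowCols row = (row.map pvTok0, row.map pvTok1) := by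
  unfold pvRowCols
  cases row with
  | nil => simp
  | cons s rest => simp [pvTok0, pvTok1, Function.comp]

-- A's outer loop, characterised
theorem pvOuter_eq (dataset : List (List String)) (Acc : List (List String) × List (List String)) :
    dataset.foldl
      (fun (Acc : List (List String) × List (List String)) row =>
        let inner := row.foldl
          (fun (acc : List String × List String) s =>
            (acc.1 ++ [pvTok0 s], acc.2 ++ [pvTok1 s])) ([], [])
        (Acc.1 ++ [inner.1], Acc.2 ++ [inner.2])) Acc
    = (Acc.1 ++ dataset.map (fun row => row.map pvTok0),
       Acc.2 ++ dataset.map (fun row => row.map pvTok1)) := by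
  induction dataset generalizing Acc with
  | nil => simp
  | cons row rest ih => rw [List.foldl_cons, ih]; simp [pvInner_eq]

-- ===== VERDICT (by name: the statement is the Claim_ definition above) =====
theorem convertItemToChar_spec : Claim_equal_convertItemToChar := by
  intro dataset _ _
  unfold Spec_convertItemToChar convertItemToChar convertItemToChar_alt
  simp [pvOuter_eq, pvRowCols_eq, Function.comp]
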